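-- pv_equiv track=rewrite | github.com/sergidiazlopez/TweetClassification | algorithm.py | generate_counts
-- ===== SOURCE A (Python) =====
-- def generate_counts(x, y):
--     """
--     Genera un diccionari amb el nombre de vegades que apareix cada paraula clau en un tweet positiu o en negatiu
--     """
--     dictionary = {}
--
--     for content, classification in zip(x, y):
--         for word in content.split():
--             if not dictionary.get(word):    # Si no te entrada al diccionari, la creem
--                 dictionary[word] = [0, 0]
--             dictionary[word][classification] += 1
--
--     return dictionary
-- ===== SOURCE B (Python) =====
-- def generate_counts(x, y):
--     """
--     Genera un diccionari amb el nombre de vegades que apareix cada paraula clau en un tweet positiu o en negatiu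
--     """
--     # First pass: flat occurrence table keyed by (word, classification) pairs.
--     counts = {}
--     for content, classification in zip(x, y):
--         for word in content.split():
--             key = (word, classification)
--             counts[key] = counts.get(key, 0) + 1
--
--     # Second pass: reshape the flat table into the word -> [neg, pos] dictionary.
--     result = {}
--     for (word, cls), cnt in counts.items():
--         result.setdefault(word, [0, 0])
--         result[word][cls] += cnt
--     return result
-- ===== Notes on version B (the rewrite author's own statement) =====
-- stated objective: alternative
-- what changed: A interleaves counting and dict-of-[neg,pos]-lists maintenance in one nested loop; B first counts occurrences in a flat table keyed by (word, classification) pairs and then reshapes that table into the word -> [neg, pos] dictionary in a second pass.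
import Mathlib
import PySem

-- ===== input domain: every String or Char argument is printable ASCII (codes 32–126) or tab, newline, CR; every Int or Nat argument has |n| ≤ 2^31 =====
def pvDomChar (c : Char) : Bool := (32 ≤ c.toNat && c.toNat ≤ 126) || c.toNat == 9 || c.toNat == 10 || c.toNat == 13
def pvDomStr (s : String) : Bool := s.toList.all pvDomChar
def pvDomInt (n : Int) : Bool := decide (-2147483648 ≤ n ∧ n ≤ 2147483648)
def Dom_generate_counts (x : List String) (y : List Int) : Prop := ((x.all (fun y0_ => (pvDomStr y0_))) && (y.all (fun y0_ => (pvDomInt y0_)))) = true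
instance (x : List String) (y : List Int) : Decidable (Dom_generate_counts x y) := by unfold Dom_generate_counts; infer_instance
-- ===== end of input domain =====

-- B replaces A's interleaved dict-of-lists accumulation by a flat (word, class) counting pass
-- followed by a reshape pass (objective: alternative decomposition, same complexity).

-- ===== PORT A =====
-- `dictionary[word][classification] += 1` is ported as pySetD/pyGetD (Python list indexing with
-- negative-index wrap; the IndexError case is excluded by Pre_generate_counts below).
def generate_counts (x : List String) (y : List Int) : List (String × List Int) :=
  ((x.zip y).foldl
    (fun dict p =>
      (PySem.Str.split₀ p.1).foldl
        (fun dict word =>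
          -- `if not dictionary.get(word)`: true iff get(word) is None or the empty list
          let dict := if ((dict.get? word).getD []) = ([] : List Int) then dict.insert word [0, 0] else dict
          dict.modify word [] (fun l => PySem.List.pySetD l p.2 (PySem.List.pyGetD l p.2 0 + 1)))
        dict)
    PySem.Dict.empty).items

-- ===== PORT B =====
def generate_counts_alt (x : List String) (y : List Int) : List (String × List Int) :=
  let counts : PySem.Dict (String × Int) Int :=
    (x.zip y).foldl
      (fun c p =>
        (PySem.Str.split₀ p.1).foldl
          (fun c word => c.insert (word, p.2) (c.getD (word, p.2) 0 + 1)) c)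
      PySem.Dict.empty
  (counts.items.foldl
    (fun r q =>
      let r := r.setdefault q.1.1 [0, 0]
      r.modify q.1.1 [] (fun l => PySem.List.pySetD l q.1.2 (PySem.List.pyGetD l q.1.2 0 + q.2)))
    PySem.Dict.empty).items

-- ===== PRECONDITION & SPEC =====
-- Pre_ excludes exactly the inputs on which Python A raises IndexError: a classification outside
-- {-2,-1,0,1} that is actually used (paired with a content containing at least one word).
def Pre_generate_counts (x : List String) (y : List Int) : Prop :=
  ∀ p ∈ x.zip y, PySem.Str.split₀ p.1 ≠ [] → (-2 ≤ p.2 ∧ p.2 ≤ 1)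
instance (x : List String) (y : List Int) : Decidable (Pre_generate_counts x y) := by unfold Pre_generate_counts; infer_instance

def pvWitness_generate_counts : List String × List Int := (["good day", "bad"], [1, 0])

def Spec_generate_counts (x : List String) (y : List Int) (out : List (String × List Int)) : Prop := out = generate_counts_alt x y
instance (x : List String) (y : List Int) (out : List (String × List Int)) : Decidable (Spec_generate_counts x y out) := by unfold Spec_generate_counts; infer_instance

-- ===== CLAIM (what is proved, stated in full; the proofs are below) =====
def Claim_equal_generate_counts : Prop := ∀ (x : List String) (y : List Int), Dom_generate_counts x y → Pre_generate_counts x y → Spec_generate_counts x y (generate_counts x y)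

-- ===== LEMMAS AND PROOFS =====

-- the flat stream of (word, classification) events both programs consume
def pvEvents (x : List String) (y : List Int) : List (String × Int) :=
  (x.zip y).flatMap (fun p => (PySem.Str.split₀ p.1).map (fun w => (w, p.2)))

-- `v[c] += n` on a Python list v
def pvBump (l : List Int) (c n : Int) : List Int :=
  PySem.List.pySetD l c (PySem.List.pyGetD l c 0 + n)

-- one word-event step of A
def pvStepA (d : PySem.Dict String (List Int)) (e : String × Int) : PySem.Dict String (List Int) :=
  let d' := if ((d.get? e.1).getD []) = ([] : List Int) then d.insert e.1 [0, 0] else d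
  d'.modify e.1 [] (fun l => PySem.List.pySetD l e.2 (PySem.List.pyGetD l e.2 0 + 1))

-- one reshape step of B
def pvStepB (r : PySem.Dict String (List Int)) (q : (String × Int) × Int) : PySem.Dict String (List Int) :=
  let r' := r.setdefault q.1.1 [0, 0]
  r'.modify q.1.1 [] (fun l => PySem.List.pySetD l q.1.2 (PySem.List.pyGetD l q.1.2 0 + q.2))

def pvInd0 (c : Int) : Int := if c = 0 ∨ c = -2 then 1 else 0
def pvInd1 (c : Int) : Int := if c = 1 ∨ c = -1 then 1 else 0

lemma pvFoldl_flatMap {α β γ : Type} (L : List α) (g : α → List β) (f : γ → β → γ) (init : γ) :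
    L.foldl (fun acc p => (g p).foldl f acc) init = (L.flatMap g).foldl f init := by
  induction L generalizing init with
  | nil => rfl
  | cons a L ih => simp [List.flatMap_cons, List.foldl_append, ih]

lemma pvA_eq_flat (x : List String) (y : List Int) :
    generate_counts x y = ((pvEvents x y).foldl pvStepA PySem.Dict.empty).items := by
  unfold generate_counts pvEvents
  rw [← pvFoldl_flatMap]
  congr 1
  congr 1
  funext dict p
  rw [List.foldl_map]
  rfl

lemma pvB_eq_flat (x : List String) (y : List Int) :
    generate_counts_alt x y =
      ((PySem.Dict.counter (pvEvents x y)).items.foldl pvStepB PySem.Dict.empty).items := by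
  unfold generate_counts_alt
  have hc : (x.zip y).foldl
      (fun c p => (PySem.Str.split₀ p.1).foldl
        (fun c word => c.insert (word, p.2) (c.getD (word, p.2) 0 + 1)) c)
      PySem.Dict.empty = PySem.Dict.counter (pvEvents x y) := by
    rw [pvEvents, ← PySem.Dict.foldl_insert_getD_add_one_eq_counter, ← pvFoldl_flatMap]
    congr 1
    funext c p
    rw [List.foldl_map]
  rw [hc]
  rfl

-- ---- keys ----
lemma pvAdd_of_mem {α : Type} [BEq α] [LawfulBEq α] (s : PySem.Set α) (x : α) (h : x ∈ s) :
    PySem.Set.add s x = s := by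
  simp [PySem.Set.add, PySem.Set.contains, h]

lemma pvAdd_of_not_mem {α : Type} [BEq α] [LawfulBEq α] (s : PySem.Set α) (x : α) (h : x ∉ s) :
    PySem.Set.add s x = s ++ [x] := by
  simp [PySem.Set.add, PySem.Set.contains, h]

lemma pvOfList_append_singleton {α : Type} [BEq α] [LawfulBEq α] (l : List α) (a : α) :
    PySem.Set.ofList (l ++ [a]) = PySem.Set.add (PySem.Set.ofList l) a := by
  simp [PySem.Set.ofList, List.foldl_append]

lemma pvKeys_insert {κ ν : Type} [BEq κ] [LawfulBEq κ] (d : PySem.Dict κ ν) (k : κ) (v : ν) :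
    (d.insert k v).keys = PySem.Set.add d.keys k := by
  by_cases hc : d.contains k = true
  · rw [PySem.Dict.keys_insert_of_contains _ _ hc,
      pvAdd_of_mem _ _ ((PySem.Dict.contains_iff_mem_keys _ _).mp hc)]
  · rw [PySem.Dict.keys_insert_of_not_contains _ _ (by simpa using hc),
      pvAdd_of_not_mem _ _ (fun hm => hc ((PySem.Dict.contains_iff_mem_keys _ _).mpr hm))]

lemma pvKeys_stepA (d : PySem.Dict String (List Int)) (e : String × Int) :
    (pvStepA d e).keys = PySem.Set.add d.keys e.1 := by
  unfold pvStepA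
  by_cases hg : (d.get? e.1).getD [] = ([] : List Int)
  · rw [if_pos hg, PySem.Dict.keys_modify, pvKeys_insert, pvKeys_insert]
    exact pvAdd_of_mem _ _ ((PySem.Set.mem_add _ _ _).mpr (Or.inr rfl))
  · rw [if_neg hg, PySem.Dict.keys_modify, pvKeys_insert]

lemma pvKeys_stepB (r : PySem.Dict String (List Int)) (q : (String × Int) × Int) :
    (pvStepB r q).keys = PySem.Set.add r.keys q.1.1 := by
  unfold pvStepB
  rw [PySem.Dict.keys_modify, pvKeys_insert, PySem.Dict.keys_setdefault]
  by_cases hc : r.contains q.1.1 = true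
  · rw [if_pos hc]
  · rw [if_neg hc]
    have hnm : q.1.1 ∉ r.keys := fun hm => hc ((PySem.Dict.contains_iff_mem_keys _ _).mpr hm)
    rw [← pvAdd_of_not_mem _ _ hnm]
    exact pvAdd_of_mem _ _ ((PySem.Set.mem_add _ _ _).mpr (Or.inr rfl))

lemma pvKeys_foldA (es : List (String × Int)) :
    ((es.foldl pvStepA PySem.Dict.empty).keys) = PySem.Set.ofList (es.map (·.1)) := by
  have H : ∀ (es : List (String × Int)) (d : PySem.Dict String (List Int)),
      (es.foldl pvStepA d).keys = es.foldl (fun ks e => PySem.Set.add ks e.1) d.keys := by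
    intro es
    induction es with
    | nil => intro d; rfl
    | cons e es ih => intro d; simp only [List.foldl_cons, ih, pvKeys_stepA]
  rw [H, PySem.Dict.keys_empty, PySem.Set.ofList, List.foldl_map]
  rfl

lemma pvKeys_foldB (qs : List ((String × Int) × Int)) :
    ((qs.foldl pvStepB PySem.Dict.empty).keys) = PySem.Set.ofList (qs.map (·.1.1)) := by
  have H : ∀ (qs : List ((String × Int) × Int)) (r : PySem.Dict String (List Int)),
      (qs.foldl pvStepB r).keys = qs.foldl (fun ks q => PySem.Set.add ks q.1.1) r.keys := by
    intro qs
    induction qs with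
    | nil => intro r; rfl
    | cons q qs ih => intro r; simp only [List.foldl_cons, ih, pvKeys_stepB]
  rw [H, PySem.Dict.keys_empty, PySem.Set.ofList, List.foldl_map]
  rfl

lemma pvOfList_map_ofList {α β : Type} [BEq α] [LawfulBEq α] [BEq β] [LawfulBEq β]
    (l : List α) (f : α → β) :
    PySem.Set.ofList ((PySem.Set.ofList l).map f) = PySem.Set.ofList (l.map f) := by
  induction l using List.reverseRecOn with
  | nil => rfl
  | append_singleton l e ih =>
    rw [List.map_append, List.map_singleton, pvOfList_append_singleton,
      pvOfList_append_singleton]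
    by_cases he : e ∈ PySem.Set.ofList l
    · rw [pvAdd_of_mem _ _ he, ih,
        pvAdd_of_mem _ _ ((PySem.Set.mem_ofList _ _).mpr
          (List.mem_map_of_mem ((PySem.Set.mem_ofList _ _).mp he)))]
    · rw [pvAdd_of_not_mem _ _ he, List.map_append, List.map_singleton,
        pvOfList_append_singleton, ih]

lemma pvOfList_filter {α : Type} [BEq α] [LawfulBEq α] (l : List α) (p : α → Bool) :
    PySem.Set.ofList (l.filter p) = (PySem.Set.ofList l).filter p := by
  induction l using List.reverseRecOn with
  | nil => rfl
  | append_singleton l e ih =>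
    rw [List.filter_append, pvOfList_append_singleton]
    by_cases he : e ∈ PySem.Set.ofList l
    · rw [pvAdd_of_mem _ _ he, ← ih]
      by_cases hp : p e = true
      · have he' : e ∈ l.filter p :=
          List.mem_filter.mpr ⟨(PySem.Set.mem_ofList _ _).mp he, hp⟩
        simp only [List.filter_singleton, hp, cond_true]
        rw [pvOfList_append_singleton,
          pvAdd_of_mem _ _ ((PySem.Set.mem_ofList _ _).mpr he')]
      · simp [hp]
    · rw [pvAdd_of_not_mem _ _ he, List.filter_append, ← ih]
      by_cases hp : p e = true
      · have he' : e ∉ l.filter p := fun hm =>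
          he ((PySem.Set.mem_ofList _ _).mpr (List.mem_filter.mp hm).1)
        simp only [List.filter_singleton, hp, cond_true]
        rw [pvOfList_append_singleton,
          pvAdd_of_not_mem _ _ (fun hm => he' ((PySem.Set.mem_ofList _ _).mp hm))]
      · simp [hp]

lemma pvOfList_map_inj {α β : Type} [BEq α] [LawfulBEq α] [BEq β] [LawfulBEq β]
    (l : List α) (f : α → β) (hf : Function.Injective f) :
    PySem.Set.ofList (l.map f) = (PySem.Set.ofList l).map f := by
  induction l using List.reverseRecOn with
  | nil => rfl
  | append_singleton l e ih =>
    rw [List.map_append, List.map_singleton, pvOfList_append_singleton,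
      pvOfList_append_singleton]
    by_cases he : e ∈ PySem.Set.ofList l
    · rw [pvAdd_of_mem _ _ he, ih,
        pvAdd_of_mem _ _ (List.mem_map_of_mem he)]
    · rw [pvAdd_of_not_mem _ _ he, List.map_append, List.map_singleton, ← ih,
        pvAdd_of_not_mem]
      intro hm
      rcases (PySem.Set.mem_ofList _ _).mp hm with hm'
      rcases List.mem_map.mp hm' with ⟨a, ha, hfa⟩
      exact he ((PySem.Set.mem_ofList _ _).mpr (hf hfa ▸ ha))

-- ---- values ----
lemma pvBump_pair (a b c n : Int) : pvBump [a, b] c n = [a + n * pvInd0 c, b + n * pvInd1 c] := by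
  rcases eq_or_ne c 0 with rfl | h0
  · simp [pvBump, PySem.List.pySetD, PySem.List.pySet?, PySem.List.pyIdx?,
      PySem.List.pyGetD, PySem.List.pyGet?, pvInd0, pvInd1]
  rcases eq_or_ne c 1 with rfl | h1
  · simp [pvBump, PySem.List.pySetD, PySem.List.pySet?, PySem.List.pyIdx?,
      PySem.List.pyGetD, PySem.List.pyGet?, pvInd0, pvInd1]
  rcases eq_or_ne c (-1) with rfl | h2
  · simp [pvBump, PySem.List.pySetD, PySem.List.pySet?, PySem.List.pyIdx?,
      PySem.List.pyGetD, PySem.List.pyGet?, pvInd0, pvInd1]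
  rcases eq_or_ne c (-2) with rfl | h3
  · simp [pvBump, PySem.List.pySetD, PySem.List.pySet?, PySem.List.pyIdx?,
      PySem.List.pyGetD, PySem.List.pyGet?, pvInd0, pvInd1]
  have hidx : PySem.List.pyIdx? 2 c = none := by
    unfold PySem.List.pyIdx?
    split_ifs <;> first | rfl | omega
  have hlen : ([a, b] : List Int).length = 2 := rfl
  simp [pvBump, PySem.List.pySetD, PySem.List.pySet?, PySem.List.pyGetD,
    PySem.List.pyGet?, hlen, hidx, pvInd0, pvInd1, h0, h1, h2, h3]

lemma pvBump_ne_nil (l : List Int) (c n : Int) (h : l ≠ []) : pvBump l c n ≠ [] := by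
  intro hcon
  apply h
  have hl := PySem.List.length_pySetD l c (PySem.List.pyGetD l c 0 + n)
  rw [show PySem.List.pySetD l c (PySem.List.pyGetD l c 0 + n) = pvBump l c n from rfl, hcon] at hl
  exact List.eq_nil_of_length_eq_zero hl.symm

lemma pvGetD_stepA (d : PySem.Dict String (List Int)) (e : String × Int) (w : String) :
    (pvStepA d e).getD w [] =
      if e.1 = w then pvBump (if d.getD e.1 [] = [] then [0, 0] else d.getD e.1 []) e.2 1
      else d.getD w [] := by
  have hgg : (d.get? e.1).getD ([] : List Int) = d.getD e.1 [] :=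
    (PySem.Dict.getD_eq_get?_getD _ _ _).symm
  simp only [pvStepA]
  by_cases hG : (d.get? e.1).getD [] = ([] : List Int) <;> by_cases hw : e.1 = w
  · subst hw
    rw [if_pos hG, PySem.Dict.getD_modify, if_pos rfl, if_pos rfl,
      PySem.Dict.getD_insert, if_pos rfl, if_pos (hgg ▸ hG)]
    rfl
  · rw [if_pos hG, PySem.Dict.getD_modify, if_neg (fun h => hw h.symm),
      PySem.Dict.getD_insert, if_neg (fun h => hw h.symm), if_neg hw]
  · subst hw
    rw [if_neg hG, PySem.Dict.getD_modify, if_pos rfl, if_pos rfl,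
      if_neg (hgg ▸ hG)]
    rfl
  · rw [if_neg hG, PySem.Dict.getD_modify, if_neg (fun h => hw h.symm), if_neg hw]

lemma pvGetD_foldA (es : List (String × Int)) (d : PySem.Dict String (List Int)) (w : String) :
    (es.foldl pvStepA d).getD w [] =
      ((es.filter (fun e => e.1 == w)).map (·.2)).foldl
        (fun v c => pvBump (if v = [] then [0, 0] else v) c 1) (d.getD w []) := by
  induction es generalizing d with
  | nil => rfl
  | cons e es ih =>
    by_cases hw : e.1 = w
    · subst hw
      simp only [List.foldl_cons, List.filter_cons, beq_self_eq_true, if_pos,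
        List.map_cons]
      rw [ih, pvGetD_stepA, if_pos rfl]
    · simp only [List.foldl_cons, List.filter_cons,
        if_neg (by simpa using hw : ¬(e.1 == w) = true)]
      rw [ih, pvGetD_stepA, if_neg hw]

def pvNoNil (r : PySem.Dict String (List Int)) : Prop := ∀ u, r.get? u ≠ some []

lemma pvGetD_stepB (r : PySem.Dict String (List Int)) (q : (String × Int) × Int) (w : String)
    (h : pvNoNil r) :
    (pvStepB r q).getD w [] =
      if q.1.1 = w then pvBump (if r.getD q.1.1 [] = [] then [0, 0] else r.getD q.1.1 []) q.1.2 q.2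
      else r.getD w [] := by
  simp only [pvStepB]
  rw [PySem.Dict.getD_modify]
  by_cases hw : q.1.1 = w
  · subst hw
    rw [if_pos rfl, if_pos rfl]
    have hv' : (r.setdefault q.1.1 [0, 0]).getD q.1.1 [] =
        if r.getD q.1.1 [] = [] then [0, 0] else r.getD q.1.1 [] := by
      rw [PySem.Dict.getD_setdefault_self]
      rcases hq : r.get? q.1.1 with _ | v
      · simp [PySem.Dict.getD_eq_get?_getD, hq]
      · have hv : v ≠ [] := fun hveq => h q.1.1 (by rw [hq, hveq])
        simp [PySem.Dict.getD_eq_get?_getD, hq, hv]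
    rw [hv']
    rfl
  · rw [if_neg (fun hh => hw hh.symm), if_neg hw,
      PySem.Dict.getD_eq_get?_getD, PySem.Dict.get?_setdefault_of_ne _ _ (fun hh => hw hh.symm),
      ← PySem.Dict.getD_eq_get?_getD]

lemma pvNoNil_stepB (r : PySem.Dict String (List Int)) (q : (String × Int) × Int)
    (h : pvNoNil r) : pvNoNil (pvStepB r q) := by
  intro u
  simp only [pvStepB, PySem.Dict.modify]
  rw [PySem.Dict.get?_insert]
  by_cases hu : u = q.1.1
  · rw [if_pos hu]
    intro hcon
    apply pvBump_ne_nil _ q.1.2 q.2 _ (Option.some.inj hcon)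
    rw [PySem.Dict.getD_setdefault_self]
    rcases hq : r.get? q.1.1 with _ | v
    · simp [PySem.Dict.getD_eq_get?_getD, hq]
    · have hv : v ≠ [] := fun hveq => h q.1.1 (by rw [hq, hveq])
      simp [PySem.Dict.getD_eq_get?_getD, hq, hv]
  · rw [if_neg hu, PySem.Dict.get?_setdefault_of_ne _ _ (fun hh => hu (hh.trans rfl))]
    exact h u

lemma pvGetD_foldB (qs : List ((String × Int) × Int)) (r : PySem.Dict String (List Int)) (w : String)
    (h : pvNoNil r) :
    (qs.foldl pvStepB r).getD w [] =
      ((qs.filter (fun q => q.1.1 == w)).map (fun q => (q.1.2, q.2))).foldl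
        (fun v p => pvBump (if v = [] then [0, 0] else v) p.1 p.2) (r.getD w []) := by
  induction qs generalizing r with
  | nil => rfl
  | cons q qs ih =>
    by_cases hw : q.1.1 = w
    · subst hw
      simp only [List.foldl_cons, List.filter_cons, beq_self_eq_true, if_pos,
        List.map_cons]
      rw [ih _ (pvNoNil_stepB r q h), pvGetD_stepB r q _ h, if_pos rfl]
    · simp only [List.foldl_cons, List.filter_cons,
        if_neg (by simpa using hw : ¬(q.1.1 == w) = true)]
      rw [ih _ (pvNoNil_stepB r q h), pvGetD_stepB r q _ h, if_neg hw]

-- closed forms of the per-word value folds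
lemma pvFoldA_closed (cs : List Int) (a b : Int) :
    cs.foldl (fun v c => pvBump (if v = [] then [0, 0] else v) c 1) [a, b] =
      [a + (cs.map pvInd0).sum, b + (cs.map pvInd1).sum] := by
  induction cs generalizing a b with
  | nil => simp
  | cons c cs ih =>
    simp only [List.foldl_cons, List.map_cons, List.sum_cons]
    rw [if_neg (by simp : ¬([a, b] : List Int) = []), pvBump_pair, ih]
    simp [one_mul, add_assoc]

lemma pvFoldB_closed (ps : List (Int × Int)) (a b : Int) :
    ps.foldl (fun v p => pvBump (if v = [] then [0, 0] else v) p.1 p.2) [a, b] =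
      [a + (ps.map (fun p => p.2 * pvInd0 p.1)).sum, b + (ps.map (fun p => p.2 * pvInd1 p.1)).sum] := by
  induction ps generalizing a b with
  | nil => simp
  | cons p ps ih =>
    simp only [List.foldl_cons, List.map_cons, List.sum_cons]
    rw [if_neg (by simp : ¬([a, b] : List Int) = []), pvBump_pair, ih]
    simp [add_assoc]

-- sum over the deduplicated list weighted by multiplicities = plain sum
lemma pvSum_ite_eq {α : Type} [DecidableEq α] (s : List α) (c : α) (f : α → Int)
    (hs : s.Nodup) (hc : c ∈ s) :
    (s.map (fun x => if x = c then f x else 0)).sum = f c := by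
  induction s with
  | nil => cases hc
  | cons a s ih =>
    rcases List.nodup_cons.mp hs with ⟨hna, hs'⟩
    rcases List.mem_cons.mp hc with hca | hcs
    · subst hca
      simp only [List.map_cons, List.sum_cons]
      have hz : (s.map fun x => if x = c then f x else 0).sum = 0 := by
        apply List.sum_eq_zero
        intro z hz
        rcases List.mem_map.mp hz with ⟨x, hx, rfl⟩
        rw [if_neg (fun hxeq : x = c => hna (hxeq ▸ hx))]
      rw [hz, add_zero]
      simp
    · have hac : a ≠ c := fun hh => hna (hh ▸ hcs)
      simp only [List.map_cons, List.sum_cons, if_neg hac, zero_add]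
      exact ih hs' hcs

lemma pvSum_count_dedup (cs : List Int) (f : Int → Int) :
    ((PySem.Set.ofList cs).map (fun c => (cs.count c : Int) * f c)).sum = (cs.map f).sum := by
  induction cs using List.reverseRecOn with
  | nil => simp
  | append_singleton cs c ih =>
    have hcount : ∀ x : Int, (cs ++ [c]).count x = cs.count x + if x = c then 1 else 0 := by
      intro x
      rw [List.count_append, List.count_singleton]
      by_cases hxc : x = c
      · simp [hxc]
      · simp [hxc, Ne.symm hxc]
    rw [pvOfList_append_singleton, List.map_append, List.sum_append,
      List.map_singleton, List.sum_singleton]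
    by_cases hc : c ∈ cs
    · rw [pvAdd_of_mem _ _ ((PySem.Set.mem_ofList _ _).mpr hc)]
      have hsplit : ((PySem.Set.ofList cs).map fun x => ((cs ++ [c]).count x : Int) * f x).sum
          = ((PySem.Set.ofList cs).map fun x => (cs.count x : Int) * f x).sum
            + ((PySem.Set.ofList cs).map fun x => if x = c then f x else 0).sum := by
        rw [← PySem.List.sum_map_add_int]
        apply congrArg List.sum
        apply List.map_congr_left
        intro x _
        rw [hcount x]
        by_cases hxc : x = c
        · rw [if_pos hxc, if_pos hxc]
          push_cast
          ring
        · rw [if_neg hxc, if_neg hxc]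
          push_cast
          ring
      rw [hsplit, ih,
        pvSum_ite_eq _ _ _ (PySem.Set.nodup_ofList _) ((PySem.Set.mem_ofList _ _).mpr hc)]
    · rw [pvAdd_of_not_mem _ _ (fun hm => hc ((PySem.Set.mem_ofList _ _).mp hm)),
        List.map_append, List.sum_append, List.map_singleton, List.sum_singleton]
      have hsame : ((PySem.Set.ofList cs).map fun x => ((cs ++ [c]).count x : Int) * f x)
          = ((PySem.Set.ofList cs).map fun x => (cs.count x : Int) * f x) := by
        apply List.map_congr_left
        intro x hx
        have hxc : x ≠ c := fun hh => hc (hh ▸ (PySem.Set.mem_ofList _ _).mp hx)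
        rw [hcount x, if_neg hxc, add_zero]
      have hcc : ((cs ++ [c]).count c : Int) = 1 := by
        rw [hcount c, if_pos rfl, List.count_eq_zero_of_not_mem hc]
        simp
      rw [hsame, ih, hcc, one_mul]

lemma pvFoldA_from_nil (cs : List Int) :
    cs.foldl (fun v c => pvBump (if v = [] then [0, 0] else v) c 1) [] =
      if cs = [] then [] else [(cs.map pvInd0).sum, (cs.map pvInd1).sum] := by
  rcases cs with _ | ⟨c, cs⟩
  · rfl
  · have hh : (if ([] : List Int) = [] then ([0, 0] : List Int) else []) = [0, 0] := rfl
    rw [if_neg (List.cons_ne_nil c cs), List.foldl_cons, hh, pvBump_pair, pvFoldA_closed]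
    simp [one_mul]

lemma pvFoldB_from_nil (ps : List (Int × Int)) :
    ps.foldl (fun v p => pvBump (if v = [] then [0, 0] else v) p.1 p.2) [] =
      if ps = [] then []
      else [(ps.map (fun p => p.2 * pvInd0 p.1)).sum, (ps.map (fun p => p.2 * pvInd1 p.1)).sum] := by
  rcases ps with _ | ⟨p, ps⟩
  · rfl
  · have hh : (if ([] : List Int) = [] then ([0, 0] : List Int) else []) = [0, 0] := rfl
    rw [if_neg (List.cons_ne_nil p ps), List.foldl_cons, hh, pvBump_pair, pvFoldB_closed]
    simp

lemma pvOfList_eq_nil_iff {α : Type} [BEq α] [LawfulBEq α] (l : List α) :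
    PySem.Set.ofList l = [] ↔ l = [] := by
  constructor
  · intro h
    rcases l with _ | ⟨a, l⟩
    · rfl
    · exact absurd ((PySem.Set.mem_ofList _ _).mpr (List.mem_cons_self ..)) (by rw [h]; exact List.not_mem_nil)
  · intro h; subst h; rfl

-- per-word value agreement
lemma pvValue_core (cs : List Int) :
    cs.foldl (fun v c => pvBump (if v = [] then [0, 0] else v) c 1) [] =
      (((PySem.Set.ofList cs).map (fun c => (c, (cs.count c : Int)))).foldl
        (fun v p => pvBump (if v = [] then [0, 0] else v) p.1 p.2) []) := by
  rw [pvFoldA_from_nil, pvFoldB_from_nil]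
  by_cases hnil : cs = []
  · subst hnil; rfl
  · rw [if_neg hnil,
      if_neg (by
        simp only [List.map_eq_nil_iff]
        exact fun h => hnil ((pvOfList_eq_nil_iff cs).mp h))]
    rw [List.map_map, List.map_map]
    have h0 : ((PySem.Set.ofList cs).map
        ((fun p : Int × Int => p.2 * pvInd0 p.1) ∘ fun c => (c, (cs.count c : Int)))).sum
        = (cs.map pvInd0).sum := by
      have : ((fun p : Int × Int => p.2 * pvInd0 p.1) ∘ fun c => (c, (cs.count c : Int)))
          = fun c => (cs.count c : Int) * pvInd0 c := rfl
      rw [this, pvSum_count_dedup]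
    have h1 : ((PySem.Set.ofList cs).map
        ((fun p : Int × Int => p.2 * pvInd1 p.1) ∘ fun c => (c, (cs.count c : Int)))).sum
        = (cs.map pvInd1).sum := by
      have : ((fun p : Int × Int => p.2 * pvInd1 p.1) ∘ fun c => (c, (cs.count c : Int)))
          = fun c => (cs.count c : Int) * pvInd1 c := rfl
      rw [this, pvSum_count_dedup]
    rw [h0, h1]

lemma pvCount_pair (es : List (String × Int)) (w : String) (c : Int) :
    es.count (w, c) = ((es.filter (fun e => e.1 == w)).map (·.2)).count c := by
  induction es with
  | nil => rfl
  | cons e es ih =>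
    rcases e with ⟨a, b⟩
    by_cases h1 : a = w <;> by_cases h2 : b = c <;>
      simp [h1, h2, Prod.ext_iff, ih]

-- the whole thing over an arbitrary event stream
lemma pvCore (es : List (String × Int)) :
    (es.foldl pvStepA PySem.Dict.empty).items =
      ((PySem.Dict.counter es).items.foldl pvStepB PySem.Dict.empty).items := by
  rw [PySem.Dict.items_counter]
  set qs : List ((String × Int) × Int) :=
    (PySem.Set.ofList es).map (fun k => (k, (List.count k es : Int))) with hqs
  have hKA : (es.foldl pvStepA PySem.Dict.empty).keys = PySem.Set.ofList (es.map (·.1)) :=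
    pvKeys_foldA es
  have hKB : (qs.foldl pvStepB PySem.Dict.empty).keys = PySem.Set.ofList (es.map (·.1)) := by
    rw [pvKeys_foldB, hqs, List.map_map]
    exact pvOfList_map_ofList es (fun k => k.1)
  have hND : (es.foldl pvStepA PySem.Dict.empty).keys.Nodup := by
    rw [hKA]; exact PySem.Set.nodup_ofList _
  have hNDB : (qs.foldl pvStepB PySem.Dict.empty).keys.Nodup := by
    rw [hKB]; exact PySem.Set.nodup_ofList _
  rw [PySem.Dict.items_eq_map_keys _ hND ([] : List Int),
    PySem.Dict.items_eq_map_keys _ hNDB ([] : List Int), hKA, hKB]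
  apply List.map_congr_left
  intro w hw
  have hempty : ∀ u : String,
      (PySem.Dict.empty : PySem.Dict String (List Int)).get? u ≠ some [] := by
    intro u
    simp [PySem.Dict.get?_empty]
  have hval : (es.foldl pvStepA PySem.Dict.empty).getD w [] =
      (qs.foldl pvStepB PySem.Dict.empty).getD w [] := by
    rw [pvGetD_foldA, pvGetD_foldB _ _ _ hempty]
    rw [show (PySem.Dict.empty : PySem.Dict String (List Int)).getD w [] = [] from rfl]
    set cw : List Int := (es.filter (fun e => e.1 == w)).map (·.2) with hcw
    have hfil : qs.filter (fun q => q.1.1 == w)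
        = (PySem.Set.ofList (es.filter (fun e => e.1 == w))).map
            (fun k => (k, (List.count k es : Int))) := by
      rw [hqs, List.filter_map]
      have hpf : ((fun q : (String × Int) × Int => q.1.1 == w) ∘
          (fun k => (k, (List.count k es : Int)))) = (fun k : String × Int => k.1 == w) := rfl
      rw [hpf, ← pvOfList_filter]
    have hLmap : es.filter (fun e => e.1 == w) = cw.map (fun c => (w, c)) := by
      rw [hcw, List.map_map]
      have : (es.filter (fun e => e.1 == w)).map ((fun c => (w, c)) ∘ (·.2))
          = (es.filter (fun e => e.1 == w)).map id := by
        apply List.map_congr_left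
        intro e he
        have he1 : e.1 = w := by simpa using (List.mem_filter.mp he).2
        rcases e with ⟨a, b⟩
        simp only [Function.comp, id]
        rw [← he1]
      rw [this, List.map_id]
    have hinj : Function.Injective (fun c : Int => (w, c)) :=
      fun a b h => congrArg Prod.snd h
    rw [hfil, hLmap, pvOfList_map_inj _ _ hinj, List.map_map, List.map_map]
    have hcomp : (((fun q : (String × Int) × Int => (q.1.2, q.2)) ∘
        (fun k : String × Int => (k, (List.count k es : Int)))) ∘ (fun c : Int => (w, c)))
        = fun c : Int => (c, (List.count (w, c) es : Int)) := rfl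
    rw [hcomp]
    have hcnt : (PySem.Set.ofList cw).map (fun c : Int => (c, (List.count (w, c) es : Int)))
        = (PySem.Set.ofList cw).map (fun c : Int => (c, (cw.count c : Int))) := by
      apply List.map_congr_left
      intro c _
      rw [show List.count (w, c) es = es.count (w, c) from rfl, pvCount_pair es w c, hcw]
    rw [hcnt]
    exact pvValue_core cw
  rw [hval]

theorem pvMain (x : List String) (y : List Int) :
    generate_counts x y = generate_counts_alt x y := by
  rw [pvA_eq_flat, pvB_eq_flat]
  exact pvCore (pvEvents x y)

-- ===== VERDICT (by name: the statement is the Claim_ definition above) =====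
theorem generate_counts_spec : Claim_equal_generate_counts := by
  intro x y _ _
  exact pvMain x y
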